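-- pv_equiv track=rewrite | github.com/Keyti/Python | LoveCalculator.py | tyleSamo
-- ===== SOURCE A (Python) =====
-- def tyleSamo(imi,tab):
--     same = 0
--     for i in range(len(imi)):
--         if imi[i] in tab:
--             same +=1
--         else:
--             same = 0
--     return same
-- ===== SOURCE B (Python) =====
-- def tyleSamo(imi, tab):
--     # Count the trailing run: scan from the end, stop at the first char not in tab.
--     n = 0
--     for c in reversed(imi):
--         if c not in tab:
--             break
--         n += 1
--     return n
-- ===== Notes on version B (the rewrite author's own statement) =====
-- stated objective: simpler
-- what changed: B scans backwards from the end counting chars in tab and stops at the first non-member, instead of A's full left-to-right scan that increments and resets an accumulator.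
import Mathlib
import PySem

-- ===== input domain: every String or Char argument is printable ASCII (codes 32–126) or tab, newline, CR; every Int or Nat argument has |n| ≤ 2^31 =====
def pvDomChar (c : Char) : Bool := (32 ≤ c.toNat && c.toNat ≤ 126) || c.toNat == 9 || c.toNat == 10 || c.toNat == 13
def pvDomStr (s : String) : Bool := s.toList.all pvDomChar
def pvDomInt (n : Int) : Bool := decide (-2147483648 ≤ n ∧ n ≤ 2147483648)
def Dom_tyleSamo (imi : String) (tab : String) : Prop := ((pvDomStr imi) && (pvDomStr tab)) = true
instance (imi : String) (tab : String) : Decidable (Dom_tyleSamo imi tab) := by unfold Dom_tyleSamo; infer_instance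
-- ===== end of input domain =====

-- B counts the trailing run by scanning backwards with early exit, instead of A's
-- full left-to-right increment-and-reset scan; objective: simpler.

-- ===== PORT A =====
-- for i in range(len(imi)): if imi[i] in tab: same += 1 else: same = 0
def tyleSamo (imi : String) (tab : String) : Int :=
  (PySem.List.pyRange 0 (imi.toList.length : Int) 1).foldl
    (fun same i =>
      if (tab.toList).contains (PySem.List.pyGetD imi.toList i ' ') then same + 1 else 0) 0

-- ===== PORT B =====
-- n = 0; for c in reversed(imi): if c not in tab: break; n += 1
def tyleSamoRun (t : List Char) : List Char → Int
  | [] => 0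
  | c :: rest => if t.contains c then 1 + tyleSamoRun t rest else 0

def tyleSamo_alt (imi : String) (tab : String) : Int :=
  tyleSamoRun tab.toList imi.toList.reverse

-- ===== PRECONDITION & SPEC =====
def Spec_tyleSamo (imi : String) (tab : String) (out : Int) : Prop := out = tyleSamo_alt imi tab
instance (imi : String) (tab : String) (out : Int) : Decidable (Spec_tyleSamo imi tab out) := by unfold Spec_tyleSamo; infer_instance

-- ===== CLAIM (what is proved, stated in full; the proofs are below) =====
def Claim_equal_tyleSamo : Prop := ∀ (imi : String) (tab : String), Dom_tyleSamo imi tab → Spec_tyleSamo imi tab (tyleSamo imi tab)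

-- ===== LEMMAS AND PROOFS =====
theorem tyleSamo_foldl_eq_run (t : List Char) (l : List Char) :
    l.foldl (fun same c => if t.contains c then same + 1 else 0) 0 = tyleSamoRun t l.reverse := by
  induction l using List.reverseRecOn with
  | nil => simp [tyleSamoRun]
  | append_singleton l c ih =>
      rw [List.foldl_append, List.reverse_append]
      simp only [List.foldl_cons, List.foldl_nil, List.reverse_singleton, List.singleton_append,
        tyleSamoRun, ih]
      split <;> omega

-- ===== VERDICT (by name: the statement is the Claim_ definition above) =====
theorem tyleSamo_spec : Claim_equal_tyleSamo := by
  intro imi tab _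
  unfold Spec_tyleSamo tyleSamo tyleSamo_alt
  rw [PySem.List.foldl_pyRange_zero_pyGetD' imi.toList ' '
      (fun same c => if (tab.toList).contains c then same + 1 else 0) 0]
  exact tyleSamo_foldl_eq_run tab.toList imi.toList
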